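-- pv_equiv track=rewrite | github.com/dipsterr/dsa-python-2024 | TRIAL.py | find_group_id
-- ===== SOURCE A (Python) =====
-- def find_group_id(PFR):
--     group_id = 0
--     n = len(PFR)
--     group_id = 0
--
--     for i in range(n):
--         score = 15  # Assume the score is 15 initially
--
--         # Check if there's a student behind with a higher PFR
--         for j in range(i+1, n):
--             if PFR[j] > PFR[i]:
--                 score = 10  # Found a student with higher PFR
--                 # Check if there's a student behind this student with a smaller PFR
--                 for k in range(j+1, n):
--                     if PFR[k] < PFR[j]:
--                         score = 5  # Found a student with a smaller PFR
--                         break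
--                 break
--
--         group_id += score
--
--     return group_id
-- ===== SOURCE B (Python) =====
-- def find_group_id(PFR):
--     # Monotonic stack of (value, has_smaller_after) + running suffix minimum, one reverse pass.
--     total = 0
--     stack = []
--     mn = None
--     for v in reversed(PFR):
--         while stack and stack[-1][0] <= v:
--             stack.pop()
--         if not stack:
--             total += 15
--         elif stack[-1][1]:
--             total += 5
--         else:
--             total += 10
--         stack.append((v, mn is not None and mn < v))
--         if mn is None or v < mn:
--             mn = v
--     return total
-- ===== Notes on version B (the rewrite author's own statement) =====
-- stated objective: faster
-- what changed: Replaced the nested index scans (first-greater scan per i, then a smaller-after scan per hit) by a single right-to-left pass with a monotonic stack carrying (value, has-smaller-after) flags computed from a running suffix minimum.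
import Mathlib
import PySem

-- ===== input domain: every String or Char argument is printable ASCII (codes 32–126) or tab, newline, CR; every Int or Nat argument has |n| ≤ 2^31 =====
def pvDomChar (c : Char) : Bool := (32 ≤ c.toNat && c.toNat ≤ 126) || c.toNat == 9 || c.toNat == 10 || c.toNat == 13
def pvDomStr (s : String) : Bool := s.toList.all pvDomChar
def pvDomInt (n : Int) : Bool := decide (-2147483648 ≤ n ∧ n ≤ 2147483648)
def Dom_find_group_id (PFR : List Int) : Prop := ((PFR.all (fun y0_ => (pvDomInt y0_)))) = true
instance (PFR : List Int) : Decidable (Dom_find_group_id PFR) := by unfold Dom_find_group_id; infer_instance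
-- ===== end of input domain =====

-- B replaces A's nested first-greater / smaller-after index scans by one right-to-left
-- monotonic-stack pass with a running suffix minimum (asymptotically faster).

-- ===== PORT A =====
-- "for k in range(j+1, n): if PFR[k] < PFR[j]: score = 5; break"  (pj = PFR[j]; returns the score)
def pvAk (PFR : List Int) (pj : Int) : List Int → Int
  | [] => 10
  | k :: rest => if (PySem.List.pyGet? PFR k).getD 0 < pj then 5 else pvAk PFR pj rest

-- "for j in range(i+1, n): if PFR[j] > PFR[i]: … break"  (pi = PFR[i]; returns the score)
def pvAj (PFR : List Int) (n pi_ : Int) : List Int → Int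
  | [] => 15
  | j :: rest =>
      if (PySem.List.pyGet? PFR j).getD 0 > pi_ then
        pvAk PFR ((PySem.List.pyGet? PFR j).getD 0) (PySem.List.pyRange (j + 1) n 1)
      else pvAj PFR n pi_ rest

def find_group_id (PFR : List Int) : Int :=
  (PySem.List.pyRange 0 (PFR.length : Int) 1).foldl
    (fun group_id i =>
      group_id + pvAj PFR (PFR.length : Int) ((PySem.List.pyGet? PFR i).getD 0)
        (PySem.List.pyRange (i + 1) (PFR.length : Int) 1))
    0

-- ===== PORT B =====
-- "while stack and stack[-1][0] <= v: stack.pop()"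
def pvPopLE (v : Int) : List (Int × Bool) → List (Int × Bool)
  | [] => []
  | (w, f) :: rest => if w ≤ v then pvPopLE v rest else (w, f) :: rest

-- one iteration of "for v in reversed(PFR)" on the state (stack, mn, total)
def pvBStep (v : Int) (st : List (Int × Bool) × Option Int × Int) :
    List (Int × Bool) × Option Int × Int :=
  let stack := pvPopLE v st.1
  let total := st.2.2 + (match stack with
    | [] => (15 : Int)
    | (_, f) :: _ => if f then 5 else 10)
  let flag := match st.2.1 with | none => false | some m => decide (m < v)
  ((v, flag) :: stack,
   (match st.2.1 with | none => some v | some m => some (if v < m then v else m)),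
   total)

def find_group_id_alt (PFR : List Int) : Int :=
  (PFR.foldr pvBStep ([], none, 0)).2.2

-- ===== PRECONDITION & SPEC =====
def Spec_find_group_id (PFR : List Int) (out : Int) : Prop := out = find_group_id_alt PFR
instance (PFR : List Int) (out : Int) : Decidable (Spec_find_group_id PFR out) := by unfold Spec_find_group_id; infer_instance

-- ===== CLAIM (what is proved, stated in full; the proofs are below) =====
def Claim_equal_find_group_id : Prop := ∀ (PFR : List Int), Dom_find_group_id PFR → Spec_find_group_id PFR (find_group_id PFR)

-- ===== LEMMAS AND PROOFS =====

-- reference score of one student with value v and the students behind him t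
def pvScore (v : Int) : List Int → Int
  | [] => 15
  | w :: t => if v < w then (if t.any (fun x => x < w) then 5 else 10) else pvScore v t

-- reference total
def pvG : List Int → Int
  | [] => 0
  | x :: t => pvScore x t + pvG t

-- stack contents after processing a suffix t (right to left)
def pvStackSpec : List Int → List (Int × Bool)
  | [] => []
  | v :: t => (v, t.any (fun x => x < v)) :: pvPopLE v (pvStackSpec t)

def pvMnSpec : List Int → Option Int :=
  List.foldr (fun v acc => match acc with | none => some v | some m => some (if v < m then v else m)) none

lemma pvAk_eq (PFR : List Int) (pj : Int) :
    ∀ (j : Nat), pvAk PFR pj (PySem.List.pyRange (j : Int) (PFR.length : Int) 1)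
      = (if (PFR.drop j).any (fun x => x < pj) then 5 else 10) := by
  intro j
  by_cases hj : j < PFR.length
  · induction hd : PFR.length - j generalizing j with
    | zero => omega
    | succ d ih =>
      rw [PySem.List.pyRange_one_cons (by exact_mod_cast hj), pvAk]
      have h1 : ((j : Int) + 1) = ((j + 1 : Nat) : Int) := by push_cast; ring
      rw [PySem.List.pyGet?_natCast]
      have hget : PFR[(j : Nat)]? = some PFR[j] := List.getElem?_eq_getElem hj
      rw [hget]
      have hdrop : PFR.drop j = PFR[j] :: PFR.drop (j + 1) := List.drop_eq_getElem_cons hj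
      rw [hdrop, List.any_cons]
      by_cases hlt : PFR[j] < pj
      · simp [hlt]
      · simp only [hlt, decide_false, Option.getD_some, Bool.false_or]
        by_cases hj1 : j + 1 < PFR.length
        · rw [h1, ih (j + 1) hj1 (by omega)]; simp
        · have : PFR.drop (j + 1) = [] := List.drop_eq_nil_of_le (by omega)
          rw [h1, this]
          have : PySem.List.pyRange ((j + 1 : Nat) : Int) (PFR.length : Int) 1 = [] :=
            PySem.List.pyRange_one_eq_nil (by exact_mod_cast (by omega : PFR.length ≤ j + 1))
          rw [this, pvAk]
          simp
  · have hnil : PySem.List.pyRange (j : Int) (PFR.length : Int) 1 = [] :=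
      PySem.List.pyRange_one_eq_nil (by exact_mod_cast (by omega : PFR.length ≤ j))
    have hdrop : PFR.drop j = [] := List.drop_eq_nil_of_le (by omega)
    rw [hnil, hdrop, pvAk]
    simp

lemma pvAj_eq (PFR : List Int) (v : Int) :
    ∀ (j : Nat), pvAj PFR (PFR.length : Int) v (PySem.List.pyRange (j : Int) (PFR.length : Int) 1)
      = pvScore v (PFR.drop j) := by
  intro j
  by_cases hj : j < PFR.length
  · induction hd : PFR.length - j generalizing j with
    | zero => omega
    | succ d ih =>
      rw [PySem.List.pyRange_one_cons (by exact_mod_cast hj), pvAj]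
      have h1 : ((j : Int) + 1) = ((j + 1 : Nat) : Int) := by push_cast; ring
      rw [PySem.List.pyGet?_natCast]
      have hget : PFR[(j : Nat)]? = some PFR[j] := List.getElem?_eq_getElem hj
      rw [hget]
      have hdrop : PFR.drop j = PFR[j] :: PFR.drop (j + 1) := List.drop_eq_getElem_cons hj
      rw [hdrop, pvScore]
      by_cases hgt : v < PFR[j]
      · rw [if_pos (by simpa using hgt), if_pos hgt]
        simp only [Option.getD_some]
        rw [h1, pvAk_eq PFR PFR[j] (j + 1)]
      · rw [if_neg (by simpa using hgt), if_neg hgt]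
        by_cases hj1 : j + 1 < PFR.length
        · rw [h1, ih (j + 1) hj1 (by omega)]
        · have hd2 : PFR.drop (j + 1) = [] := List.drop_eq_nil_of_le (by omega)
          have hr : PySem.List.pyRange ((j + 1 : Nat) : Int) (PFR.length : Int) 1 = [] :=
            PySem.List.pyRange_one_eq_nil (by exact_mod_cast (by omega : PFR.length ≤ j + 1))
          rw [h1, hr, hd2, pvAj, pvScore]
  · have hnil : PySem.List.pyRange (j : Int) (PFR.length : Int) 1 = [] :=
      PySem.List.pyRange_one_eq_nil (by exact_mod_cast (by omega : PFR.length ≤ j))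
    have hdrop : PFR.drop j = [] := List.drop_eq_nil_of_le (by omega)
    rw [hnil, hdrop, pvAj, pvScore]

lemma pvA_eq_G (PFR : List Int) :
    ∀ (j : Nat) (acc : Int),
      (PySem.List.pyRange (j : Int) (PFR.length : Int) 1).foldl
        (fun group_id i =>
          group_id + pvAj PFR (PFR.length : Int) ((PySem.List.pyGet? PFR i).getD 0)
            (PySem.List.pyRange (i + 1) (PFR.length : Int) 1)) acc
      = acc + pvG (PFR.drop j) := by
  intro j
  by_cases hj : j < PFR.length
  · induction hd : PFR.length - j generalizing j with
    | zero => omega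
    | succ d ih =>
      intro acc
      rw [PySem.List.pyRange_one_cons (by exact_mod_cast hj), List.foldl_cons]
      have h1 : ((j : Int) + 1) = ((j + 1 : Nat) : Int) := by push_cast; ring
      have hget : PFR[(j : Nat)]? = some PFR[j] := List.getElem?_eq_getElem hj
      have hdrop : PFR.drop j = PFR[j] :: PFR.drop (j + 1) := List.drop_eq_getElem_cons hj
      have hstep : pvAj PFR (PFR.length : Int) ((PySem.List.pyGet? PFR (j : Int)).getD 0)
          (PySem.List.pyRange ((j : Int) + 1) (PFR.length : Int) 1)
          = pvScore PFR[j] (PFR.drop (j + 1)) := by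
        rw [PySem.List.pyGet?_natCast, hget, h1]
        exact pvAj_eq PFR PFR[j] (j + 1)
      rw [hstep]
      by_cases hj1 : j + 1 < PFR.length
      · rw [h1, ih (j + 1) hj1 (by omega)]
        rw [hdrop, pvG]; ring
      · have hd2 : PFR.drop (j + 1) = [] := List.drop_eq_nil_of_le (by omega)
        have hr : PySem.List.pyRange ((j + 1 : Nat) : Int) (PFR.length : Int) 1 = [] :=
          PySem.List.pyRange_one_eq_nil (by exact_mod_cast (by omega : PFR.length ≤ j + 1))
        rw [h1, hr, List.foldl_nil, hdrop, hd2, pvG, pvG]; ring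
  · intro acc
    have hnil : PySem.List.pyRange (j : Int) (PFR.length : Int) 1 = [] :=
      PySem.List.pyRange_one_eq_nil (by exact_mod_cast (by omega : PFR.length ≤ j))
    have hdrop : PFR.drop j = [] := List.drop_eq_nil_of_le (by omega)
    rw [hnil, hdrop, List.foldl_nil, pvG]; ring

lemma pvA_eq (PFR : List Int) : find_group_id PFR = pvG PFR := by
  have := pvA_eq_G PFR 0 0
  simpa [find_group_id] using this

lemma pvPopLE_popLE (v w : Int) (h : w ≤ v) :
    ∀ s : List (Int × Bool), pvPopLE v (pvPopLE w s) = pvPopLE v s := by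
  intro s
  induction s with
  | nil => rfl
  | cons p rest ih =>
    obtain ⟨x, f⟩ := p
    by_cases hx : x ≤ w
    · rw [pvPopLE, if_pos hx, ih, pvPopLE, if_pos (le_trans hx h)]
    · rw [pvPopLE, if_neg hx]

lemma pvKey (v : Int) : ∀ t : List Int,
    (match pvPopLE v (pvStackSpec t) with
      | [] => (15 : Int)
      | (_, f) :: _ => if f then 5 else 10) = pvScore v t := by
  intro t
  induction t with
  | nil => rfl
  | cons w t' ih =>
    rw [pvStackSpec, pvScore]
    by_cases hw : v < w
    · rw [pvPopLE, if_neg (by omega), if_pos hw]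
    · rw [pvPopLE, if_pos (by omega), pvPopLE_popLE v w (by omega), if_neg hw, ih]

lemma pvMn_lt (v : Int) : ∀ t : List Int,
    (match pvMnSpec t with | none => false | some m => decide (m < v))
      = t.any (fun x => x < v) := by
  intro t
  induction t with
  | nil => rfl
  | cons w t' ih =>
    rw [List.any_cons]
    show (match (match pvMnSpec t' with
        | none => some w | some m => some (if w < m then w else m)) with
        | none => false | some m => decide (m < v)) = _
    cases h : pvMnSpec t' with
    | none =>
      rw [h] at ih
      simp [← ih]
    | some m =>
      rw [h] at ih
      by_cases hwm : w < m <;> simp [hwm, ← ih] <;> omega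

lemma pvB_inv : ∀ t : List Int,
    t.foldr pvBStep ([], none, 0) = (pvStackSpec t, pvMnSpec t, pvG t) := by
  intro t
  induction t with
  | nil => rfl
  | cons v t' ih =>
    rw [List.foldr_cons, ih]
    show pvBStep v (pvStackSpec t', pvMnSpec t', pvG t')
        = ((v, t'.any (fun x => x < v)) :: pvPopLE v (pvStackSpec t'), _, pvScore v t' + pvG t')
    unfold pvBStep
    simp only
    refine Prod.ext ?_ (Prod.ext ?_ ?_)
    · simp [pvMn_lt v t']
    · rfl
    · show pvG t' + _ = pvScore v t' + pvG t'
      rw [pvKey v t']; ring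

lemma pvB_eq (PFR : List Int) : find_group_id_alt PFR = pvG PFR := by
  rw [find_group_id_alt, pvB_inv]

-- ===== VERDICT (by name: the statement is the Claim_ definition above) =====
theorem find_group_id_spec : Claim_equal_find_group_id := by
  intro PFR _
  show find_group_id PFR = find_group_id_alt PFR
  rw [pvA_eq, pvB_eq]
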